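-- pv_equiv track=rewrite | github.com/ferndferdinand/MaterialManejoDatos9161 | 4. Comlejidad Algoritmica/contando.py | sumar_menor_cant_elementos
-- ===== SOURCE A (Python) =====
-- def sumar_menor_cant_elementos(lista):
--     listaAuxiliar = lista.copy()
--     listaOrdenada = []
--     iteraciones = 0                                         #(n*(n-1))/2
--     for i in range(len(lista)):                             #O(n)
--         maximo = listaAuxiliar[0]
--         for k in range(len(listaAuxiliar)):                 #O(n-1)
--             iteraciones += 1
--             if maximo <= listaAuxiliar[k]:
--                 maximo = listaAuxiliar[k]
--         listaAuxiliar.remove(maximo)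
--         listaOrdenada.append(maximo)
--
--         if sum(listaOrdenada) > len(lista)**2:
--             return listaOrdenada
--     return listaOrdenada
-- ===== SOURCE B (Python) =====
-- def sumar_menor_cant_elementos(lista):
--     limite = len(lista) ** 2
--     resultado = []
--     acumulado = 0
--     for x in sorted(lista, reverse=True):
--         resultado.append(x)
--         acumulado += x
--         if acumulado > limite:
--             return resultado
--     return resultado
-- ===== Notes on version B (the rewrite author's own statement) =====
-- stated objective: faster
-- what changed: Replaces A's repeated whole-list max scan + remove (selection sort with early stop) by one descending sort followed by a single accumulating pass with a running sum.
import Mathlib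
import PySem

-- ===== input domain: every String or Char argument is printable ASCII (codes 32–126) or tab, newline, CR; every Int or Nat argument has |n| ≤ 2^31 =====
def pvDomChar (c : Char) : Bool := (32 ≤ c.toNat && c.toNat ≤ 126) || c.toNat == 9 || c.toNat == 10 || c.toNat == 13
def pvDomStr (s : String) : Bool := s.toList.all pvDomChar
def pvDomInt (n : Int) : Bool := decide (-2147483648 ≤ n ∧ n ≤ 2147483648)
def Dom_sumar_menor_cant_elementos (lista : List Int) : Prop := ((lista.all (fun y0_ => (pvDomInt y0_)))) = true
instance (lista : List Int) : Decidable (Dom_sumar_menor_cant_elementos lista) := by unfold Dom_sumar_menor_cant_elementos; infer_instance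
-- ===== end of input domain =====

-- B replaces A's repeated whole-list max scan with one descending sort and a single
-- accumulating pass (objective: faster).

-- ===== PORT A =====
-- outer loop of A: fuel = number of remaining iterations of `for i in range(len(lista))`;
-- state = (listaAuxiliar, listaOrdenada); n2 = len(lista)**2
def pvALoop (fuel : Nat) (aux ord : List Int) (n2 : Int) : List Int :=
  match fuel with
  | 0 => ord
  | i + 1 =>
    match aux with
    | [] => ord   -- unreachable: fuel starts at lista.length and aux loses exactly one element per step
    | a :: _ =>
      -- maximo = listaAuxiliar[0]; for k in range(len(listaAuxiliar)): if maximo <= aux[k]: maximo = aux[k]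
      let maximo := aux.foldl (fun m x => if m ≤ x then x else m) a
      let aux' := (PySem.List.remove? aux maximo).getD []   -- listaAuxiliar.remove(maximo); maximo ∈ aux, never none
      let ord' := ord ++ [maximo]
      if ord'.sum > n2 then ord' else pvALoop i aux' ord' n2

def sumar_menor_cant_elementos (lista : List Int) : List Int :=
  pvALoop lista.length lista [] ((lista.length : Int) ^ 2)

-- ===== PORT B =====
-- single pass over sorted(lista, reverse=True) carrying the running sum `acumulado`
def pvBLoop (rest ord : List Int) (acumulado n2 : Int) : List Int :=
  match rest with
  | [] => ord
  | x :: rest' =>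
    let ord' := ord ++ [x]
    let acumulado' := acumulado + x
    if acumulado' > n2 then ord' else pvBLoop rest' ord' acumulado' n2

def sumar_menor_cant_elementos_alt (lista : List Int) : List Int :=
  pvBLoop (PySem.List.sorted lista (fun x => x) true) [] 0 ((lista.length : Int) ^ 2)

-- ===== PRECONDITION & SPEC =====
def Spec_sumar_menor_cant_elementos (lista : List Int) (out : List Int) : Prop := out = sumar_menor_cant_elementos_alt lista
instance (lista : List Int) (out : List Int) : Decidable (Spec_sumar_menor_cant_elementos lista out) := by unfold Spec_sumar_menor_cant_elementos; infer_instance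

-- ===== CLAIM (what is proved, stated in full; the proofs are below) =====
def Claim_equal_sumar_menor_cant_elementos : Prop := ∀ (lista : List Int), Dom_sumar_menor_cant_elementos lista → Spec_sumar_menor_cant_elementos lista (sumar_menor_cant_elementos lista)

-- ===== LEMMAS AND PROOFS =====

-- the inner max-scan fold: its result is an element of a :: l …
lemma pvFoldMax_mem (l : List Int) (a : Int) :
    l.foldl (fun m x => if m ≤ x then x else m) a ∈ a :: l := by
  induction l generalizing a with
  | nil => simp
  | cons y l ih =>
    simp only [List.foldl_cons]
    rcases List.mem_cons.mp (ih (if a ≤ y then y else a)) with h' | h'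
    · rw [h']; split_ifs <;> simp
    · simp [h']

-- … and it dominates the initial value …
lemma pvFoldMax_init_le (l : List Int) (a : Int) :
    a ≤ l.foldl (fun m x => if m ≤ x then x else m) a := by
  induction l generalizing a with
  | nil => simp
  | cons y l ih =>
    simp only [List.foldl_cons]
    by_cases hle : a ≤ y
    · simpa [hle] using le_trans hle (ih y)
    · simpa [hle] using ih a

-- … and every element of the list scanned
lemma pvFoldMax_le (l : List Int) (a x : Int) (hx : x ∈ l) :
    x ≤ l.foldl (fun m x => if m ≤ x then x else m) a := by
  induction l generalizing a with
  | nil => simp at hx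
  | cons y l ih =>
    simp only [List.foldl_cons]
    rcases List.mem_cons.mp hx with rfl | h'
    · refine le_trans ?_ (pvFoldMax_init_le l (if a ≤ x then x else a))
      split_ifs with hle
      · exact le_refl x
      · omega
    · exact ih _ h'

-- sorted(aux, reverse=True) = max :: sorted(aux.erase max, reverse=True)
lemma pvSorted_rev_cons_max (aux : List Int) (m : Int) (hm : m ∈ aux)
    (hmax : ∀ x ∈ aux, x ≤ m) :
    PySem.List.sorted aux (fun x => x) true
      = m :: PySem.List.sorted (aux.erase m) (fun x => x) true := by
  have hperm₁ : (PySem.List.sorted aux (fun x => x) true).Perm aux :=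
    PySem.List.sorted_perm ..
  have hperm₂ : (m :: PySem.List.sorted (aux.erase m) (fun x => x) true).Perm aux := by
    refine List.Perm.trans (List.Perm.cons m (PySem.List.sorted_perm ..)) ?_
    exact (List.perm_cons_erase hm).symm
  have hkey : Function.Injective (fun x : Int => -x) := fun a b h => by
    simpa using h
  refine PySem.List.eq_of_perm_of_pairwise_le_of_injective (fun x : Int => -x) hkey
    (hperm₁.trans hperm₂.symm) ?_ ?_
  · have h := PySem.List.sorted_pairwise_rev (xs := aux) (key := fun x : Int => x)
    exact h.imp (fun {a b} hab => by simpa using hab)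
  · rw [List.pairwise_cons]
    constructor
    · intro b hb
      have hb1 : b ∈ aux.erase m := (PySem.List.mem_sorted ..).mp hb
      have hb' : b ∈ aux := List.erase_subset hb1
      simpa using hmax b hb'
    · have h := PySem.List.sorted_pairwise_rev (xs := aux.erase m) (key := fun x : Int => x)
      exact h.imp (fun {a b} hab => by simpa using hab)

-- main loop correspondence: A's selection loop with fuel = |aux| equals B's pass over
-- the descending sort, provided B's accumulator carries ord.sum
lemma pvLoop_eq : ∀ (n : Nat) (aux ord : List Int) (n2 : Int), aux.length = n →
    pvALoop n aux ord n2
      = pvBLoop (PySem.List.sorted aux (fun x => x) true) ord ord.sum n2 := by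
  intro n
  induction n with
  | zero =>
    intro aux ord n2 hlen
    have : aux = [] := List.eq_nil_of_length_eq_zero hlen
    subst this
    simp [pvALoop, pvBLoop, PySem.List.sorted]
  | succ i ih =>
    intro aux ord n2 hlen
    match aux, hlen with
    | a :: t, hlen =>
      obtain ⟨m, hmdef⟩ : ∃ m, m = (a :: t).foldl (fun m x => if m ≤ x then x else m) a :=
        ⟨_, rfl⟩
      have hmem : m ∈ a :: t := by
        rw [hmdef]
        rcases List.mem_cons.mp (pvFoldMax_mem (a :: t) a) with h' | h'
        · rw [h']; exact List.mem_cons_self ..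
        · exact h'
      have hmax : ∀ x ∈ a :: t, x ≤ m := fun x hx => hmdef ▸ pvFoldMax_le (a :: t) a x hx
      have hrem : PySem.List.remove? (a :: t) m = some ((a :: t).erase m) :=
        PySem.List.remove?_eq_some_erase (a :: t) m hmem
      have hsplit := pvSorted_rev_cons_max (a :: t) m hmem hmax
      have hsum : (ord ++ [m]).sum = ord.sum + m := by simp
      have hlen' : ((a :: t).erase m).length = i := by
        rw [List.length_erase_of_mem hmem, hlen]
        omega
      simp only [pvALoop]
      rw [← hmdef, hrem, hsplit]
      simp only [pvBLoop, Option.getD_some, hsum]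
      by_cases hgt : ord.sum + m > n2
      · simp [hgt]
      · simp only [hgt, if_false]
        rw [ih ((a :: t).erase m) (ord ++ [m]) n2 hlen', hsum]

-- ===== VERDICT (by name: the statement is the Claim_ definition above) =====
theorem sumar_menor_cant_elementos_spec : Claim_equal_sumar_menor_cant_elementos := by
  intro lista _
  show sumar_menor_cant_elementos lista = sumar_menor_cant_elementos_alt lista
  unfold sumar_menor_cant_elementos sumar_menor_cant_elementos_alt
  simpa using pvLoop_eq lista.length lista [] ((lista.length : Int) ^ 2) rfl
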